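-- pv_equiv track=rewrite | github.com/newjersey/navigator.business.nj.gov | content/scripts/find_duplicate_industries.py | find_duplicate_groups
-- ===== SOURCE A (Python) =====
-- from collections import defaultdict
--
-- def find_duplicate_groups(industries):
--     """Group industries by identical task sets.
--
--     Args:
--         industries: List of (name, id, task_set) tuples.
--
--     Returns:
--         A list of (task_set, [(name, id), ...]) for groups with 2+ members,
--         sorted by group size descending.
--     """
--     groups = defaultdict(list)
--     for name, industry_id, task_set in industries:
--         groups[task_set].append((name, industry_id))
--
--     duplicates = [
--         (task_set, members)
--         for task_set, members in groups.items()
--         if len(members) >= 2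
--     ]
--     duplicates.sort(key=lambda g: len(g[1]), reverse=True)
--     return duplicates
-- ===== SOURCE B (Python) =====
-- def find_duplicate_groups(industries):
--     """Group industries by identical task sets.
--
--     Dict-free re-implementation: collect the distinct task sets in first-seen
--     order, then build each group by scanning the input for its members.
--     """
--     seen = []
--     for _, _, ts in industries:
--         if ts not in seen:
--             seen.append(ts)
--     groups = [
--         (ts, [(n, i) for n, i, t in industries if t == ts])
--         for ts in seen
--     ]
--     duplicates = [g for g in groups if len(g[1]) >= 2]
--     duplicates.sort(key=lambda g: len(g[1]), reverse=True)
--     return duplicates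
-- ===== Notes on version B (the rewrite author's own statement) =====
-- stated objective: alternative
-- what changed: Replaces the defaultdict grouping with a dict-free two-phase scan: dedup the task sets in first-seen order, then rebuild each group's members by filtering the input list.
import Mathlib
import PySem

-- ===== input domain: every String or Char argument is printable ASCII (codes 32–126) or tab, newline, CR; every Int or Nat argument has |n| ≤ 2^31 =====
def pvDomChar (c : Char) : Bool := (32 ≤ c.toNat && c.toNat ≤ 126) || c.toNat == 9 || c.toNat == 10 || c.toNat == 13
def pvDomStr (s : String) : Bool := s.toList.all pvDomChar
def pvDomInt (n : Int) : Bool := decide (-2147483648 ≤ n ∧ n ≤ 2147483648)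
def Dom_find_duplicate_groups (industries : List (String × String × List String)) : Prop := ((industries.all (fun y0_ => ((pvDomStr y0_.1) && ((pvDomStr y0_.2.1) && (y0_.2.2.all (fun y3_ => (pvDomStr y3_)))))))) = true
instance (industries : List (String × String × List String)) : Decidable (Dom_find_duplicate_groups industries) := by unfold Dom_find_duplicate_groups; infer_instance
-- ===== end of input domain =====

-- B replaces A's defaultdict grouping with a dict-free two-phase scan (dedup the
-- keys in first-seen order, then rebuild each group by filtering the input);
-- objective: alternative (not faster).

-- ===== PORT A =====
-- groups = defaultdict(list); groups[task_set].append((name, industry_id))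
-- is d.modify task_set [] (· ++ [(name, industry_id)])
def find_duplicate_groups (industries : List (String × String × List String)) : List (List String × (List (String × String))) :=
  let groups : PySem.Dict (List String) (List (String × String)) :=
    industries.foldl (fun d p => d.modify p.2.2 [] (fun ms => ms ++ [(p.1, p.2.1)])) PySem.Dict.empty
  let duplicates := groups.items.filter (fun g => 2 ≤ g.2.length)
  PySem.List.sorted duplicates (fun g => (g.2.length : Int)) true

-- ===== PORT B =====
def find_duplicate_groups_alt (industries : List (String × String × List String)) : List (List String × (List (String × String))) :=
  let seen : List (List String) :=
    industries.foldl (fun acc p => if p.2.2 ∈ acc then acc else acc ++ [p.2.2]) []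
  let groups :=
    seen.map (fun ts => (ts, (industries.filter (fun q => q.2.2 == ts)).map (fun q => (q.1, q.2.1))))
  let duplicates := groups.filter (fun g => 2 ≤ g.2.length)
  PySem.List.sorted duplicates (fun g => (g.2.length : Int)) true

-- ===== PRECONDITION & SPEC =====
def Spec_find_duplicate_groups (industries : List (String × String × List String)) (out : List (List String × (List (String × String)))) : Prop := out = find_duplicate_groups_alt industries
instance (industries : List (String × String × List String)) (out : List (List String × (List (String × String)))) : Decidable (Spec_find_duplicate_groups industries out) := by unfold Spec_find_duplicate_groups; infer_instance

-- ===== CLAIM (what is proved, stated in full; the proofs are below) =====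
def Claim_equal_find_duplicate_groups : Prop := ∀ (industries : List (String × String × List String)), Dom_find_duplicate_groups industries → Spec_find_duplicate_groups industries (find_duplicate_groups industries)

-- ===== LEMMAS AND PROOFS =====

-- B's first-seen dedup loop is PySem.Set.ofList of the task-set column.
theorem seen_eq_foldl_add (industries : List (String × String × List String)) (s : List (List String)) :
    industries.foldl (fun acc p => if p.2.2 ∈ acc then acc else acc ++ [p.2.2]) s
      = industries.foldl (fun acc p => PySem.Set.add acc p.2.2) s := by
  induction industries generalizing s with
  | nil => rfl
  | cons x xs ih =>
      simp only [List.foldl_cons]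
      have hx : (if x.2.2 ∈ s then s else s ++ [x.2.2]) = PySem.Set.add s x.2.2 := by
        by_cases h : x.2.2 ∈ s <;> simp [PySem.Set.add, PySem.Set.contains, h]
      rw [hx, ih]

theorem seen_eq_ofList (industries : List (String × String × List String)) :
    industries.foldl (fun acc p => if p.2.2 ∈ acc then acc else acc ++ [p.2.2]) []
      = PySem.Set.ofList (industries.map (fun p => p.2.2)) := by
  rw [seen_eq_foldl_add, ← PySem.Set.update_map_eq_foldl_add, PySem.Set.update_nil_left]

-- A's dict, rewritten as a fold over the (key, value) pairs.
theorem groups_eq_foldl_pairs (industries : List (String × String × List String)) :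
    industries.foldl (fun d p => d.modify p.2.2 [] (fun ms => ms ++ [(p.1, p.2.1)])) PySem.Dict.empty
      = (industries.map (fun p => (p.2.2, (p.1, p.2.1)))).foldl
          (fun d q => d.modify q.1 [] (fun ms => ms ++ [q.2])) PySem.Dict.empty := by
  rw [List.foldl_map]

-- A's dict items are exactly B's (key, members) list.
theorem items_eq (industries : List (String × String × List String)) :
    (industries.foldl (fun d p => d.modify p.2.2 [] (fun ms => ms ++ [(p.1, p.2.1)])) PySem.Dict.empty).items
      = (industries.foldl (fun acc p => if p.2.2 ∈ acc then acc else acc ++ [p.2.2]) []).map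
          (fun ts => (ts, (industries.filter (fun q => q.2.2 == ts)).map (fun q => (q.1, q.2.1)))) := by
  have hkeys :
      (industries.foldl (fun d p => d.modify p.2.2 [] (fun ms => ms ++ [(p.1, p.2.1)])) PySem.Dict.empty).keys
        = PySem.Set.ofList (industries.map (fun p => p.2.2)) := by
    have := PySem.Dict.keys_foldl_modify_key industries (fun p => p.2.2) []
      (fun _ p => fun ms => ms ++ [(p.1, p.2.1)]) PySem.Dict.empty
    simpa [PySem.Set.update_nil_left] using this
  have hnodup :
      (industries.foldl (fun d p => d.modify p.2.2 [] (fun ms => ms ++ [(p.1, p.2.1)])) PySem.Dict.empty).keys.Nodup := by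
    exact PySem.Dict.nodup_keys_foldl_modify_key industries (fun p => p.2.2) []
      (fun _ p => fun ms => ms ++ [(p.1, p.2.1)]) PySem.Dict.empty (by simp [PySem.Dict.keys_empty])
  rw [PySem.Dict.items_eq_map_keys _ hnodup [], hkeys, seen_eq_ofList]
  refine List.map_congr_left (fun k _ => ?_)
  have hgetD :
      (industries.foldl (fun d p => d.modify p.2.2 [] (fun ms => ms ++ [(p.1, p.2.1)])) PySem.Dict.empty).getD k []
        = (industries.filter (fun q => q.2.2 == k)).map (fun q => (q.1, q.2.1)) := by
    rw [groups_eq_foldl_pairs]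
    rw [PySem.Dict.getD_foldl_modify_append (industries.map (fun p => (p.2.2, (p.1, p.2.1)))) PySem.Dict.empty k]
    simp [List.filter_map, Function.comp_def]
  rw [hgetD]

-- ===== VERDICT (by name: the statement is the Claim_ definition above) =====
theorem find_duplicate_groups_spec : Claim_equal_find_duplicate_groups := by
  intro industries _
  unfold Spec_find_duplicate_groups find_duplicate_groups find_duplicate_groups_alt
  simp only
  rw [items_eq]
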